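-- pv_equiv track=rewrite | github.com/GalaDoker/project2_Dukhanina_Galina_M25-555 | src/primitive_db/parser.py | _split_by_and
-- ===== SOURCE A (Python) =====
-- def _split_by_and(s: str) -> list:
--     """Разбивает строку по ' AND ' (без учёта регистра); пробелы схлопываются в один."""
--     s = " ".join(s.split())
--     parts = []
--     s_lower = s.lower()
--     sep = " and "
--     start = 0
--     while True:
--         idx = s_lower.find(sep, start)
--         if idx == -1:
--             part = s[start:].strip()
--             if part:
--                 parts.append(part)
--             break
--         part = s[start:idx].strip()
--         if part:
--             parts.append(part)
--         start = idx + len(sep)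
--     return parts
-- ===== SOURCE B (Python) =====
-- def _split_by_and(s: str) -> list:
--     """Разбивает строку по ' AND ' (без учёта регистра); пробелы схлопываются в один."""
--     words = s.split()
--     parts = []
--     cur = []
--     i = 0
--     while i < len(words):
--         w = words[i]
--         if cur and w.lower() == "and" and i + 1 < len(words):
--             parts.append(" ".join(cur))
--             cur = [words[i + 1]]
--             i += 2
--         else:
--             cur.append(w)
--             i += 1
--     if cur:
--         parts.append(" ".join(cur))
--     return parts
-- ===== Notes on version B (the rewrite author's own statement) =====
-- stated objective: alternative
-- what changed: B never builds the whitespace-normalized string and never searches for the substring ' and ': it tokenizes the input into words once and does a single word-level scan with one-token lookahead, flushing the current group when an interior word is 'and' (case-insensitive) and skipping separator-plus-next-word together, which reproduces A's non-overlapping left-to-right find behaviour.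
import Mathlib
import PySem

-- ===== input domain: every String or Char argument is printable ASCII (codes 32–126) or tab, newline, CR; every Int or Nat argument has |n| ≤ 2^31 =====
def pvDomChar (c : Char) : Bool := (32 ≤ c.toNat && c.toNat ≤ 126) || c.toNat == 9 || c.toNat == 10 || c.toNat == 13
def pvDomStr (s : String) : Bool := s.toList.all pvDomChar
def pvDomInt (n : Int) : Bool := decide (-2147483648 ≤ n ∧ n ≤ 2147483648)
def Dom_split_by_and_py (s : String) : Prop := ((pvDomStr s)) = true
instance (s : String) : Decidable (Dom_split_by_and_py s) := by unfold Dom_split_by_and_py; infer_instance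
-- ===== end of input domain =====

-- B replaces A's substring search over a lowered copy of the normalized string by a single
-- word-level scan with one-token lookahead (objective: alternative; same observable result).

-- ===== PORT A =====
-- the separator " and " as a list of chars
def pvSep : List Char := [' ', 'a', 'n', 'd', ' ']

-- the while loop of A: repeatedly find " and " in the lowered copy from `start`,
-- emit the stripped slice of the original, advance past the separator.
-- fuel only makes the recursion structural (cs.length + 1 provably suffices:
-- each iteration advances start by at least 5 and start stays ≤ cs.length)
def pvGoA (cs slow : List Char) : Nat → Nat → List (List Char)
  | 0, _ => []
  | fuel + 1, start =>
    let idx := PySem.Chars.findFrom slow pvSep (start : Int) none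
    if idx = -1 then
      let part := PySem.Chars.strip (PySem.List.slice cs (some (start : Int)) none)
      if part.isEmpty then [] else [part]
    else
      let part := PySem.Chars.strip (PySem.List.slice cs (some (start : Int)) (some idx))
      let rest := pvGoA cs slow fuel (idx.toNat + 5)
      if part.isEmpty then rest else part :: rest

def split_by_and_py (s : String) : List String :=
  let cs := PySem.Chars.join [' '] (PySem.Chars.split₀ s.toList)   -- s = " ".join(s.split())
  let slow := PySem.Chars.lower cs                                 -- s_lower = s.lower()
  (pvGoA cs slow (cs.length + 1) 0).map String.ofList

-- ===== PORT B =====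
-- the word "and" as a list of chars
def pvAnd : List Char := ['a', 'n', 'd']

-- the while loop of B over the word list, with the current group `cur` as accumulator:
-- `i + 1 < len(words)` is exactly "the remaining list has a second element", so the
-- loop body is transcribed by pattern-matching on the remaining words
def pvGoB : List (List Char) → List (List Char) → List (List Char)
  | cur, [] => if cur.isEmpty then [] else [PySem.Chars.join [' '] cur]
  | cur, w :: [] => pvGoB (cur ++ [w]) []          -- i + 1 < len(words) is false: else branch
  | cur, w :: w2 :: rest2 =>
    if cur.isEmpty = false ∧ PySem.Chars.lower w = pvAnd then
      PySem.Chars.join [' '] cur :: pvGoB [w2] rest2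
    else
      pvGoB (cur ++ [w]) (w2 :: rest2)

def split_by_and_py_alt (s : String) : List String :=
  (pvGoB [] (PySem.Chars.split₀ s.toList)).map String.ofList       -- words = s.split()

-- ===== PRECONDITION & SPEC =====
def Spec_split_by_and_py (s : String) (out : List String) : Prop := out = split_by_and_py_alt s
instance (s : String) (out : List String) : Decidable (Spec_split_by_and_py s out) := by unfold Spec_split_by_and_py; infer_instance

-- ===== CLAIM (what is proved, stated in full; the proofs are below) =====
def Claim_equal_split_by_and_py : Prop := ∀ (s : String), Dom_split_by_and_py s → Spec_split_by_and_py s (split_by_and_py s)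

-- ===== LEMMAS AND PROOFS =====

-- words are nonempty and contain no whitespace
def pvGood (ws : List (List Char)) : Prop :=
  ∀ w ∈ ws, w ≠ [] ∧ ∀ c ∈ w, PySem.Chars.isspace c = false

-- the common reference function: first word stands alone; an interior "and" word splits
def pvRef : List (List Char) → List (List Char)
  | [] => []
  | [w] => [w]
  | w :: w2 :: rest =>
    if PySem.Chars.lower w2 = pvAnd ∧ rest ≠ [] then
      w :: pvRef rest
    else
      match pvRef (w2 :: rest) with
      | [] => [w]
      | p :: ps => (w ++ ' ' :: p) :: ps
termination_by ws => ws.length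

-- character position of the first " and " separator in the joined lowered words
def pvSepPos : List (List Char) → Int
  | [] => -1
  | [_] => -1
  | w :: w2 :: rest =>
    if PySem.Chars.lower w2 = pvAnd ∧ rest ≠ [] then (w.length : Int)
    else if pvSepPos (w2 :: rest) = -1 then -1
    else (w.length : Int) + 1 + pvSepPos (w2 :: rest)
termination_by ws => ws.length

theorem pv_sepPos_nonneg : ∀ (ws : List (List Char)), pvSepPos ws ≠ -1 → 0 ≤ pvSepPos ws
  | [] => by intro h; simp [pvSepPos] at h
  | [w] => by intro h; simp [pvSepPos] at h
  | w :: w2 :: rest => by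
    intro h
    rw [pvSepPos] at h ⊢
    split_ifs at h ⊢ with h1 h2
    · positivity
    · exact absurd rfl h
    · have := pv_sepPos_nonneg (w2 :: rest) h2
      omega

-- ---- split₀ produces good words ----
theorem pv_split₀_go_good :
    ∀ (s cur : List Char) (acc : List (List Char)),
      (∀ c ∈ cur, PySem.Chars.isspace c = false) →
      ∀ w ∈ PySem.Chars.split₀.go s cur acc,
        w ∈ acc ∨ (w ≠ [] ∧ ∀ c ∈ w, PySem.Chars.isspace c = false)
  | [], cur, acc => by
    intro hcur w hw
    rw [PySem.Chars.split₀.go] at hw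
    split_ifs at hw with hc
    · simp only [List.mem_reverse] at hw
      exact Or.inl hw
    · simp only [List.mem_reverse, List.mem_cons] at hw
      rcases hw with h | h
      · right
        subst h
        refine ⟨by simpa [List.isEmpty_iff] using hc, ?_⟩
        intro c hc'
        exact hcur c (by simpa using hc')
      · exact Or.inl h
  | c :: rest, cur, acc => by
    intro hcur w hw
    rw [PySem.Chars.split₀.go] at hw
    split_ifs at hw with hs hc
    · exact pv_split₀_go_good rest [] acc (by simp) w hw
    · rcases pv_split₀_go_good rest [] (cur.reverse :: acc) (by simp) w hw with h | h
      · rcases List.mem_cons.mp h with h | h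
        · right
          subst h
          refine ⟨by simpa [List.isEmpty_iff] using hc, ?_⟩
          intro c' hc'
          exact hcur c' (by simpa using hc')
        · exact Or.inl h
      · exact Or.inr h
    · refine pv_split₀_go_good rest (c :: cur) acc ?_ w hw
      intro c' hc'
      rcases List.mem_cons.mp hc' with h | h
      · subst h
        simpa using hs
      · exact hcur c' h

theorem pv_split₀_good (s : List Char) : pvGood (PySem.Chars.split₀ s) := by
  intro w hw
  rcases pv_split₀_go_good s [] [] (by simp) w hw with h | h
  · simp at h
  · exact h

-- ---- facts about lower ----
theorem pv_isspace_lowerChar (c : Char) (h : PySem.Chars.isspace c = false) :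
    PySem.Chars.isspace (PySem.Chars.lowerChar c) = false := by
  unfold PySem.Chars.lowerChar
  split_ifs with hu
  · have h1 : 65 ≤ c.toNat ∧ c.toNat ≤ 90 := by
      simpa [PySem.Chars.isupper, Char.le_def] using hu
    have htn : (Char.ofNat (c.toNat + 32)).toNat = c.toNat + 32 := by
      rw [Char.toNat_ofNat, if_pos (Or.inl (by omega))]
    simp only [PySem.Chars.isspace, htn]
    simp only [Bool.or_eq_false_iff, Bool.and_eq_false_iff, decide_eq_false_iff_not]
    omega
  · exact h

theorem pv_lower_length (w : List Char) : (PySem.Chars.lower w).length = w.length := by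
  simp [PySem.Chars.lower]

theorem pvLowerCharSpace : PySem.Chars.lowerChar ' ' = ' ' := by decide

theorem pv_lower_join (ws : List (List Char)) :
    PySem.Chars.lower (PySem.Chars.join [' '] ws) =
      PySem.Chars.join [' '] (ws.map PySem.Chars.lower) := by
  induction ws with
  | nil => rfl
  | cons w ws ih =>
    cases ws with
    | nil => simp [PySem.Chars.join, PySem.Chars.lower, List.intercalate]
    | cons v vs =>
      rw [List.map_cons, PySem.Chars.join_cons_cons, List.map_cons,
        PySem.Chars.join_cons_cons, ← List.map_cons (f := PySem.Chars.lower), ← ih]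
      simp only [PySem.Chars.lower, List.map_append]
      simp [pvLowerCharSpace]

-- ---- join facts ----
theorem pv_join_cons (w : List Char) (ws : List (List Char)) (h : ws ≠ []) :
    PySem.Chars.join [' '] (w :: ws) = w ++ ' ' :: PySem.Chars.join [' '] ws := by
  cases ws with
  | nil => exact absurd rfl h
  | cons v vs => simpa using PySem.Chars.join_cons_cons [' '] w v vs

theorem pv_join_snoc (ws : List (List Char)) (w : List Char) (h : ws ≠ []) :
    PySem.Chars.join [' '] (ws ++ [w]) = PySem.Chars.join [' '] ws ++ ' ' :: w := by
  induction ws with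
  | nil => exact absurd rfl h
  | cons v vs ih =>
    cases vs with
    | nil => simpa using PySem.Chars.join_cons_cons [' '] v w []
    | cons u us =>
      rw [List.cons_append, pv_join_cons v ((u :: us) ++ [w]) (by simp),
        ih (by simp), pv_join_cons v (u :: us) (by simp)]
      simp

theorem pv_join_ends (ws : List (List Char)) (hg : pvGood ws) (h : ws ≠ []) :
    PySem.Chars.join [' '] ws ≠ [] ∧
    (∀ c, (PySem.Chars.join [' '] ws).head? = some c → PySem.Chars.isspace c = false) ∧
    (∀ c, (PySem.Chars.join [' '] ws).getLast? = some c → PySem.Chars.isspace c = false) := by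
  induction ws with
  | nil => exact absurd rfl h
  | cons w ws ih =>
    obtain ⟨hwne, hwsp⟩ := hg w (by simp)
    cases ws with
    | nil =>
      rw [PySem.Chars.join_singleton]
      refine ⟨hwne, ?_, ?_⟩
      · intro c hc
        exact hwsp c (List.mem_of_mem_head? hc)
      · intro c hc
        exact hwsp c (List.mem_of_mem_getLast? hc)
    | cons v vs =>
      obtain ⟨hJne, hJh, hJl⟩ := ih (fun u hu => hg u (by simp [hu])) (by simp)
      rw [pv_join_cons w (v :: vs) (by simp)]
      refine ⟨by simp, ?_, ?_⟩
      · intro c hc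
        rw [List.head?_append_of_ne_nil _ hwne] at hc
        exact hwsp c (List.mem_of_mem_head? hc)
      · intro c hc
        rw [show ' ' :: PySem.Chars.join [' '] (v :: vs) = [' '] ++ PySem.Chars.join [' '] (v :: vs) from rfl,
          ← List.append_assoc, List.getLast?_append_of_ne_nil _ hJne] at hc
        exact hJl c hc

theorem pv_strip_id (l : List Char) (hne : l ≠ [])
    (hh : ∀ c, l.head? = some c → PySem.Chars.isspace c = false)
    (hl : ∀ c, l.getLast? = some c → PySem.Chars.isspace c = false) :
    PySem.Chars.strip l = l := by
  obtain ⟨c, t, rfl⟩ : ∃ c t, l = c :: t := by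
    cases l with
    | nil => exact absurd rfl hne
    | cons c t => exact ⟨c, t, rfl⟩
  have hc : PySem.Chars.isspace c = false := hh c rfl
  unfold PySem.Chars.strip PySem.Chars.lstrip PySem.Chars.rstrip
  rw [List.dropWhile_cons, if_neg (by simp [hc])]
  cases hrev : (c :: t).reverse with
  | nil => simp at hrev
  | cons d r =>
    have hd : PySem.Chars.isspace d = false := by
      apply hl
      rw [← List.head?_reverse, hrev]
      rfl
    rw [List.dropWhile_cons, if_neg (by simp [hd])]
    rw [← hrev, List.reverse_reverse]

theorem pv_strip_join (ws : List (List Char)) (hg : pvGood ws) (h : ws ≠ []) :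
    PySem.Chars.strip (PySem.Chars.join [' '] ws) = PySem.Chars.join [' '] ws := by
  obtain ⟨h1, h2, h3⟩ := pv_join_ends ws hg h
  exact pv_strip_id _ h1 h2 h3

-- ---- find characterisation ----
theorem pv_find_nil (sub : List Char) (hsub : sub ≠ []) : PySem.Chars.find [] sub = -1 := by
  simp [PySem.Chars.find, PySem.Chars.find.go, List.isEmpty_iff, hsub]

theorem pv_find_nospace (l : List Char) (h : ∀ c ∈ l, PySem.Chars.isspace c = false) :
    PySem.Chars.find l pvSep = -1 := by
  rw [PySem.Chars.find_eq_neg_one_iff]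
  intro hin
  have hmem : ' ' ∈ l := hin.subset (by simp [pvSep])
  exact absurd (h ' ' hmem) (by decide)

theorem pv_find_go_shift (sub : List Char) (hsub : sub ≠ []) :
    ∀ (l : List Char) (k : Nat),
      PySem.Chars.find.go sub l k =
        if PySem.Chars.find.go sub l 0 = -1 then -1 else PySem.Chars.find.go sub l 0 + k := by
  intro l
  induction l with
  | nil =>
    intro k
    simp [PySem.Chars.find.go, List.isEmpty_iff, hsub]
  | cons c t ih =>
    intro k
    by_cases hp : sub.isPrefixOf (c :: t)
    · simp [PySem.Chars.find.go, hp]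
    · have e1 : ∀ m : Nat, PySem.Chars.find.go sub (c :: t) m = PySem.Chars.find.go sub t (m + 1) := by
        intro m; rw [PySem.Chars.find.go]; simp [hp]
      have hge : -1 ≤ PySem.Chars.find.go sub t 0 := by
        have := PySem.Chars.neg_one_le_find t sub
        simpa [PySem.Chars.find] using this
      rw [e1 k, e1 0, ih (k + 1), ih 1]
      split_ifs with h1 <;> push_cast <;> omega

theorem pv_find_cons (sub : List Char) (hsub : sub ≠ []) (c : Char) (t : List Char) :
    PySem.Chars.find (c :: t) sub =
      if sub.isPrefixOf (c :: t) then 0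
      else if PySem.Chars.find t sub = -1 then -1 else PySem.Chars.find t sub + 1 := by
  by_cases hp : sub.isPrefixOf (c :: t)
  · simp [PySem.Chars.find, PySem.Chars.find.go, hp]
  · simp only [PySem.Chars.find, hp]
    rw [PySem.Chars.find.go]
    simp only [hp]
    rw [pv_find_go_shift sub hsub t 1]
    push_cast
    split_ifs <;> omega

-- positions inside a space-free block are skipped
theorem pv_find_skip (a r : List Char) (h : ∀ c ∈ a, PySem.Chars.isspace c = false) :
    PySem.Chars.find (a ++ r) pvSep =
      if PySem.Chars.find r pvSep = -1 then -1 else (a.length : Int) + PySem.Chars.find r pvSep := by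
  induction a with
  | nil => simp
  | cons c a' ih =>
    have hc : c ≠ ' ' := by
      intro e
      subst e
      exact absurd (h ' ' (by simp)) (by decide)
    have hpre : pvSep.isPrefixOf (c :: (a' ++ r)) ≠ true := by
      simp only [pvSep, List.isPrefixOf]
      intro hx
      rw [Bool.and_eq_true, beq_iff_eq] at hx
      exact hc hx.1.symm
    rw [List.cons_append, pv_find_cons pvSep (by decide), if_neg hpre,
      ih (fun x hx => h x (by simp [hx]))]
    have hge : -1 ≤ PySem.Chars.find r pvSep := PySem.Chars.neg_one_le_find r pvSep
    simp only [List.length_cons]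
    split_ifs with h1 <;> push_cast <;> omega

-- "and " is a prefix of (u ++ t) for a good word u iff u is exactly "and" and t starts with a space
theorem pv_andpref (u t : List Char) (hu : u ≠ []) (hsp : ∀ c ∈ u, PySem.Chars.isspace c = false)
    (ht : t = [] ∨ ∃ t', t = ' ' :: t') :
    (['a','n','d',' '].isPrefixOf (u ++ t) = true) ↔ (u = pvAnd ∧ t ≠ []) := by
  have hsp' : ' ' ∉ u := fun hm => absurd (hsp ' ' hm) (by decide)
  match u, hu with
  | [c1], _ =>
    rcases ht with rfl | ⟨t', rfl⟩ <;> simp_all [List.isPrefixOf, pvAnd]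
  | [c1, c2], _ =>
    rcases ht with rfl | ⟨t', rfl⟩ <;> simp_all [List.isPrefixOf, pvAnd]
  | [c1, c2, c3], _ =>
    rcases ht with rfl | ⟨t', rfl⟩ <;> (simp_all [List.isPrefixOf, pvAnd]; try tauto)
  | c1 :: c2 :: c3 :: c4 :: u', _ =>
    have hc4 : c4 ≠ ' ' := by
      intro e
      exact hsp' (by simp [e])
    rcases ht with rfl | ⟨t', rfl⟩ <;> simp_all [List.isPrefixOf, pvAnd]

theorem pv_lower_nospace (w : List Char) (h : ∀ c ∈ w, PySem.Chars.isspace c = false) :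
    ∀ c ∈ PySem.Chars.lower w, PySem.Chars.isspace c = false := by
  intro c hc
  simp only [PySem.Chars.lower, List.mem_map] at hc
  obtain ⟨a, ha, rfl⟩ := hc
  exact pv_isspace_lowerChar a (h a ha)

theorem pv_find_join : ∀ (ws : List (List Char)), pvGood ws →
    PySem.Chars.find (PySem.Chars.join [' '] (ws.map PySem.Chars.lower)) pvSep = pvSepPos ws
  | [], _ => by
    simpa [pvSepPos, PySem.Chars.join, List.intercalate] using pv_find_nil pvSep (by decide)
  | [w], hg => by
    rw [List.map_cons, List.map_nil, PySem.Chars.join_singleton]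
    rw [pv_find_nospace _ (pv_lower_nospace w (hg w (by simp)).2)]
    simp [pvSepPos]
  | w :: w2 :: rest, hg => by
    obtain ⟨hw2ne, hw2sp⟩ := hg w2 (by simp)
    have hwsp := (hg w (by simp)).2
    have hrec := pv_find_join (w2 :: rest) (fun u hu => hg u (by simp [hu]))
    rw [List.map_cons, pv_join_cons _ _ (by simp)]
    rw [show PySem.Chars.lower w ++ ' ' :: PySem.Chars.join [' '] (List.map PySem.Chars.lower (w2 :: rest))
        = PySem.Chars.lower w ++ (' ' :: PySem.Chars.join [' '] (List.map PySem.Chars.lower (w2 :: rest))) from rfl]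
    rw [pv_find_skip _ _ (pv_lower_nospace w hwsp)]
    set J := PySem.Chars.join [' '] (List.map PySem.Chars.lower (w2 :: rest)) with hJ
    have hpref : (pvSep.isPrefixOf (' ' :: J) = true) ↔ (PySem.Chars.lower w2 = pvAnd ∧ rest ≠ []) := by
      have h1 : pvSep.isPrefixOf (' ' :: J) = (['a','n','d',' '].isPrefixOf J) := by
        simp [pvSep]
      rw [h1]
      cases rest with
      | nil =>
        rw [hJ, List.map_cons, List.map_nil, PySem.Chars.join_singleton]
        have := pv_andpref (PySem.Chars.lower w2) [] (by simpa [PySem.Chars.lower] using hw2ne)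
          (pv_lower_nospace w2 hw2sp) (Or.inl rfl)
        simpa using this
      | cons r1 rs =>
        rw [hJ, List.map_cons, pv_join_cons _ _ (by simp)]
        have := pv_andpref (PySem.Chars.lower w2)
          (' ' :: PySem.Chars.join [' '] (List.map PySem.Chars.lower (r1 :: rs)))
          (by simpa [PySem.Chars.lower] using hw2ne) (pv_lower_nospace w2 hw2sp) (Or.inr ⟨_, rfl⟩)
        rw [this]
        simp
    rw [pv_find_cons pvSep (by decide)]
    rw [pvSepPos]
    by_cases hAnd : PySem.Chars.lower w2 = pvAnd ∧ rest ≠ []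
    · rw [if_pos (hpref.mpr hAnd), if_pos hAnd]
      norm_num [pv_lower_length]
    · rw [if_neg (fun hx => hAnd (hpref.mp hx)), if_neg hAnd, hrec]
      by_cases hm : pvSepPos (w2 :: rest) = -1
      · simp [hm]
      · have h0 := pv_sepPos_nonneg _ hm
        rw [if_neg hm, if_neg (by omega), if_neg (by omega), pv_lower_length]
        omega

theorem pv_take_shift (w J : List Char) (n : Nat) :
    (w ++ ' ' :: J).take (w.length + 1 + n) = w ++ ' ' :: J.take n := by
  rw [List.take_append, List.take_of_length_le (by omega),
    show w.length + 1 + n - w.length = n + 1 by omega, List.take_succ_cons]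

theorem pv_drop_shift (w J : List Char) (n : Nat) :
    (w ++ ' ' :: J).drop (w.length + 1 + n) = J.drop n := by
  rw [List.drop_append, List.drop_eq_nil_of_le (by omega),
    show w.length + 1 + n - w.length = n + 1 by omega, List.drop_succ_cons, List.nil_append]

-- ---- decomposition at the first separator ----
theorem pv_sep_decomp : ∀ (ws : List (List Char)), pvGood ws → pvSepPos ws ≠ -1 →
    ∃ pre w post, ws = pre ++ w :: post ∧ pre ≠ [] ∧ post ≠ [] ∧
      PySem.Chars.lower w = pvAnd ∧
      pvSepPos ws = ((PySem.Chars.join [' '] pre).length : Int) ∧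
      (PySem.Chars.join [' '] ws).take (PySem.Chars.join [' '] pre).length
        = PySem.Chars.join [' '] pre ∧
      (PySem.Chars.join [' '] ws).drop ((PySem.Chars.join [' '] pre).length + 5)
        = PySem.Chars.join [' '] post ∧
      pvRef ws = PySem.Chars.join [' '] pre :: pvRef post
  | [], _, h => by simp [pvSepPos] at h
  | [w], _, h => by simp [pvSepPos] at h
  | w :: w2 :: rest, hg, h => by
    by_cases hs : PySem.Chars.lower w2 = pvAnd ∧ rest ≠ []
    · -- separator right after the first word
      obtain ⟨a, b, c, rfl⟩ : ∃ a b c, w2 = [a, b, c] := by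
        have h3 : w2.length = 3 := by
          have := pv_lower_length w2
          rw [hs.1] at this
          simpa [pvAnd] using this.symm
        match w2, h3 with
        | [a, b, c], _ => exact ⟨a, b, c, rfl⟩
      refine ⟨[w], [a, b, c], rest, rfl, by simp, hs.2, hs.1, ?_, ?_, ?_, ?_⟩
      · rw [pvSepPos, if_pos hs, PySem.Chars.join_singleton]
      · rw [PySem.Chars.join_singleton, pv_join_cons w ([a, b, c] :: rest) (by simp),
          List.take_left]
      · rw [PySem.Chars.join_singleton, pv_join_cons w ([a, b, c] :: rest) (by simp),
          pv_join_cons [a, b, c] rest hs.2]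
        rw [show w ++ ' ' :: ([a, b, c] ++ ' ' :: PySem.Chars.join [' '] rest)
            = (w ++ [' ', a, b, c, ' ']) ++ PySem.Chars.join [' '] rest by simp,
          show w.length + 5 = (w ++ [' ', a, b, c, ' ']).length by simp,
          List.drop_left]
      · rw [pvRef, if_pos hs, PySem.Chars.join_singleton]
    · -- separator strictly later
      have hm : pvSepPos (w2 :: rest) ≠ -1 := by
        intro hm
        rw [pvSepPos, if_neg hs, if_pos hm] at h
        exact h rfl
      obtain ⟨pre', wA, post', heq, hpre', hpost', hAnd, hpos, htake, hdrop, href⟩ :=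
        pv_sep_decomp (w2 :: rest) (fun u hu => hg u (by simp [hu])) hm
      have hJpre : PySem.Chars.join [' '] (w :: pre')
          = w ++ ' ' :: PySem.Chars.join [' '] pre' := pv_join_cons w pre' hpre'
      have hJws : PySem.Chars.join [' '] (w :: w2 :: rest)
          = w ++ ' ' :: PySem.Chars.join [' '] (w2 :: rest) :=
        pv_join_cons w (w2 :: rest) (by simp)
      refine ⟨w :: pre', wA, post', by rw [heq]; rfl, by simp, hpost', hAnd, ?_, ?_, ?_, ?_⟩
      · rw [pvSepPos, if_neg hs, if_neg hm, hpos, hJpre]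
        simp only [List.length_append, List.length_cons]
        push_cast
        omega
      · rw [hJws, hJpre,
          show (w ++ ' ' :: PySem.Chars.join [' '] pre').length
            = w.length + 1 + (PySem.Chars.join [' '] pre').length by simp; omega,
          pv_take_shift, htake]
      · rw [hJws, hJpre,
          show (w ++ ' ' :: PySem.Chars.join [' '] pre').length + 5
            = w.length + 1 + ((PySem.Chars.join [' '] pre').length + 5) by simp; omega,
          pv_drop_shift, hdrop]
      · rw [pvRef, if_neg hs, href, hJpre]

theorem pv_ref_ne_nil : ∀ (ws : List (List Char)), ws ≠ [] → pvRef ws ≠ []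
  | [w], _ => by simp [pvRef]
  | w :: w2 :: rest, _ => by
    rw [pvRef]
    split_ifs
    · simp
    · cases h : pvRef (w2 :: rest) <;> simp

theorem pv_ref_nosep : ∀ (ws : List (List Char)), pvSepPos ws = -1 → ws ≠ [] →
    pvRef ws = [PySem.Chars.join [' '] ws]
  | [w], _, _ => by simp [pvRef, PySem.Chars.join_singleton]
  | w :: w2 :: rest, h, _ => by
    by_cases h1 : PySem.Chars.lower w2 = pvAnd ∧ rest ≠ []
    · rw [pvSepPos, if_pos h1] at h
      exfalso
      omega
    · rw [pvSepPos, if_neg h1] at h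
      by_cases h2 : pvSepPos (w2 :: rest) = -1
      · rw [pvRef, if_neg h1, pv_ref_nosep (w2 :: rest) h2 (by simp),
          pv_join_cons w (w2 :: rest) (by simp)]
      · rw [if_neg h2] at h
        exfalso
        have := pv_sepPos_nonneg (w2 :: rest) h2
        omega

theorem pv_ref_merge (W w : List Char) (rest : List (List Char)) :
    ∃ p ps, pvRef (w :: rest) = p :: ps ∧
      pvRef ((W ++ ' ' :: w) :: rest) = (W ++ ' ' :: p) :: ps := by
  cases rest with
  | nil => exact ⟨w, [], by simp [pvRef], by simp [pvRef]⟩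
  | cons w2 rest2 =>
    by_cases hs : PySem.Chars.lower w2 = pvAnd ∧ rest2 ≠ []
    · exact ⟨w, pvRef rest2, by rw [pvRef, if_pos hs], by rw [pvRef, if_pos hs]⟩
    · obtain ⟨p', ps', hp'⟩ : ∃ p' ps', pvRef (w2 :: rest2) = p' :: ps' := by
        cases h : pvRef (w2 :: rest2) with
        | nil => exact absurd h (pv_ref_ne_nil _ (by simp))
        | cons a b => exact ⟨a, b, rfl⟩
      refine ⟨w ++ ' ' :: p', ps', ?_, ?_⟩
      · rw [pvRef, if_neg hs, hp']
      · rw [pvRef, if_neg hs, hp']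
        simp

-- ---- B equals the reference ----
theorem pv_goB_cur : ∀ (ws cur : List (List Char)), cur ≠ [] →
    pvGoB cur ws = pvRef (PySem.Chars.join [' '] cur :: ws)
  | [], cur, h => by
    rw [pvGoB, if_neg (by simpa [List.isEmpty_iff] using h), pvRef]
  | [w], cur, h => by
    rw [pvGoB, pvGoB, if_neg (by simp), pv_join_snoc cur w h, pvRef,
      if_neg (by simp), show pvRef [w] = [w] from by rw [pvRef]]
  | w :: w2 :: rest2, cur, h => by
    rw [pvGoB]
    have hcur : cur.isEmpty = false := by simpa [List.isEmpty_iff] using h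
    by_cases ha : PySem.Chars.lower w = pvAnd
    · rw [if_pos ⟨hcur, ha⟩, pv_goB_cur rest2 [w2] (by simp), PySem.Chars.join_singleton,
        pvRef, if_pos ⟨ha, by simp⟩]
    · rw [if_neg (fun hx => ha hx.2), pv_goB_cur (w2 :: rest2) (cur ++ [w]) (by simp),
        pv_join_snoc cur w h]
      obtain ⟨p, ps, hp1, hp2⟩ := pv_ref_merge (PySem.Chars.join [' '] cur) w (w2 :: rest2)
      rw [hp2, pvRef, if_neg (fun hx => ha hx.1), hp1]

theorem pv_goB_ref : ∀ (ws : List (List Char)), pvGoB [] ws = pvRef ws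
  | [] => by rw [pvGoB, pvRef]; simp
  | [w] => by
    rw [pvGoB, pvGoB, if_neg (by simp), List.nil_append, PySem.Chars.join_singleton,
      show pvRef [w] = [w] from by rw [pvRef]]
  | w :: w2 :: rest2 => by
    rw [pvGoB, if_neg (by simp), List.nil_append,
      pv_goB_cur (w2 :: rest2) [w] (by simp), PySem.Chars.join_singleton]

-- ---- A equals the reference ----
theorem pv_goA_ref :
    ∀ (fuel : Nat) (ws : List (List Char)) (cs : List Char) (start : Nat),
      pvGood ws → cs.drop start = PySem.Chars.join [' '] ws →
      start ≤ cs.length → cs.length - start < fuel →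
      pvGoA cs (PySem.Chars.lower cs) fuel start = pvRef ws
  | 0, ws, cs, start, _, _, _, hf => by omega
  | fuel + 1, ws, cs, start, hg, hcs, hstart, hf => by
    have hlen : (PySem.Chars.lower cs).length = cs.length := pv_lower_length cs
    have hdropslow : (PySem.Chars.lower cs).drop start
        = PySem.Chars.join [' '] (ws.map PySem.Chars.lower) := by
      rw [PySem.Chars.lower, ← List.map_drop, ← PySem.Chars.lower, hcs, pv_lower_join]
    have hlen2 : cs.length - start = (PySem.Chars.join [' '] ws).length := by
      rw [← hcs, List.length_drop]
    rw [pvGoA, PySem.Chars.findFrom_natCast (PySem.Chars.lower cs) pvSep start (by omega),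
      hdropslow, pv_find_join ws hg]
    by_cases hm : pvSepPos ws = -1
    · rw [hm, if_pos rfl, if_pos rfl, PySem.List.slice_from_natCast, hcs]
      cases ws with
      | nil =>
        rw [pvRef]
        simp [PySem.Chars.join, List.intercalate, PySem.Chars.strip,
          PySem.Chars.lstrip, PySem.Chars.rstrip]
      | cons v vs =>
        rw [pv_strip_join (v :: vs) hg (by simp), pv_ref_nosep (v :: vs) hm (by simp),
          if_neg (by simpa [List.isEmpty_iff] using (pv_join_ends (v :: vs) hg (by simp)).1)]
    · have h0 := pv_sepPos_nonneg ws hm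
      obtain ⟨pre, wA, post, heq, hpre, hpost, hAnd, hpos, htake, hdrop', href⟩ :=
        pv_sep_decomp ws hg hm
      have hgpre : pvGood pre := fun u hu => hg u (by simp [heq, hu])
      have hgpost : pvGood post := fun u hu => hg u (by simp [heq, hu])
      have hk1 : ¬(((PySem.Chars.join [' '] pre).length : Int) = -1) := by omega
      have hk2 : ¬((start : Int) + ((PySem.Chars.join [' '] pre).length : Int) = -1) := by omega
      rw [hpos, if_neg hk1, if_neg hk2, PySem.List.slice_natCast_add, hcs, htake,
        pv_strip_join pre hgpre hpre,
        if_neg (by simpa [List.isEmpty_iff] using (pv_join_ends pre hgpre hpre).1)]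
      have hJpost := (pv_join_ends post hgpost hpost).1
      have hklen : (PySem.Chars.join [' '] pre).length + 5 + 1
          ≤ (PySem.Chars.join [' '] ws).length := by
        have := congrArg List.length hdrop'
        rw [List.length_drop] at this
        have hp1 : 1 ≤ (PySem.Chars.join [' '] post).length :=
          List.length_pos_iff.mpr hJpost
        omega
      have htn : ((start : Int) + ((PySem.Chars.join [' '] pre).length : Int)).toNat + 5
          = start + ((PySem.Chars.join [' '] pre).length + 5) := by omega
      rw [htn, pv_goA_ref fuel post cs (start + ((PySem.Chars.join [' '] pre).length + 5))
        hgpost (by rw [← List.drop_drop, hcs, hdrop']) (by omega) (by omega), href]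

-- ===== VERDICT (by name: the statement is the Claim_ definition above) =====
theorem split_by_and_py_spec : Claim_equal_split_by_and_py := by
  intro s _
  unfold Spec_split_by_and_py split_by_and_py split_by_and_py_alt
  rw [pv_goB_ref]
  have := pv_goA_ref ((PySem.Chars.join [' '] (PySem.Chars.split₀ s.toList)).length + 1)
    (PySem.Chars.split₀ s.toList) (PySem.Chars.join [' '] (PySem.Chars.split₀ s.toList)) 0
    (pv_split₀_good s.toList) (by simp) (by omega) (by omega)
  simp only at this ⊢
  rw [this]
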